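-- pv_equiv track=rewrite | github.com/ttufts/custom_logger | zeus_searchv3.py | split_bot_reports
-- ===== SOURCE A (Python) =====
-- def split_bot_reports(lines):
--     bot_reports = []
--
--     this_bot = []
--
--     last_line = ""
--
--     for line in lines:
--         # Find bot start
--         if last_line.startswith("========================================") and line.startswith("Bot ID:") and len(this_bot) > 0:
--             bot_reports.append(this_bot)
--             this_bot = []
--
--             this_bot.append(last_line)
--
--         this_bot.append(line)
--
--         last_line = line
--     return bot_reports
-- ===== SOURCE B (Python) =====
-- def split_bot_reports(lines):
--     # Slice-based re-implementation: find block boundaries first, then cut slices.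
--     lines = list(lines)
--     sep = "========================================"
--     bounds = [i for i in range(1, len(lines))
--               if lines[i - 1].startswith(sep) and lines[i].startswith("Bot ID:")]
--     starts = [0] + [b - 1 for b in bounds[:-1]]
--     return [lines[s:b] for s, b in zip(starts, bounds)]
-- ===== Notes on version B (the rewrite author's own statement) =====
-- stated objective: alternative
-- what changed: Replaces the single stateful accumulate-and-flush loop by a two-phase slicing approach: first collect all boundary indices (separator line followed by a 'Bot ID:' line), then emit each block as one slice lines[s:b], sharing the separator line between consecutive blocks and dropping the unflushed final block exactly as A does.
import Mathlib
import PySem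

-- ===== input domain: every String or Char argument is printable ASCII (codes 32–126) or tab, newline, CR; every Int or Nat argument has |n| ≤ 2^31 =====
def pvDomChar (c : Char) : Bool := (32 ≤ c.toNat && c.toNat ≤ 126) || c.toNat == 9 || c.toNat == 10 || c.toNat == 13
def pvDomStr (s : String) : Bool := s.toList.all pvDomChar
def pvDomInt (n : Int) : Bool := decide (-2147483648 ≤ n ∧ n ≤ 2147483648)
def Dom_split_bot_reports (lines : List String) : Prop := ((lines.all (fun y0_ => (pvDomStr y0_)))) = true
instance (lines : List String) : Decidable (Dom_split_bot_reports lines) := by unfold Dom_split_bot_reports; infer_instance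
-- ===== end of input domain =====

-- B replaces A's stateful accumulate-and-flush loop by a two-phase boundary-scan + slicing decomposition (same cost, different structure).


-- ===== PORT A =====
-- the body of A's for-loop, over the state (bot_reports, this_bot, last_line)
def splitStep (st : List (List String) × List String × String) (line : String) :
    List (List String) × List String × String :=
  let bot_reports := st.1
  let this_bot := st.2.1
  let last_line := st.2.2
  if PySem.Str.startswith last_line "========================================" &&
     PySem.Str.startswith line "Bot ID:" && decide (0 < this_bot.length) then
    (bot_reports ++ [this_bot], [last_line, line], line)
  else
    (bot_reports, this_bot ++ [line], line)

def split_bot_reports (lines : List String) : List (List String) :=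
  (lines.foldl splitStep ([], [], "")).1

-- ===== PORT B =====
-- indices in `bounds` are always in range, so pyGetD's default is never used (exact port of lines[i-1] / lines[i])
def split_bot_reports_alt (lines : List String) : List (List String) :=
  let bounds : List Int := (PySem.List.pyRange 1 (lines.length : Int) 1).filter (fun i =>
    PySem.Str.startswith (PySem.List.pyGetD lines (i - 1) "") "========================================" &&
    PySem.Str.startswith (PySem.List.pyGetD lines i "") "Bot ID:")
  let starts : List Int := 0 :: (PySem.List.slice bounds none (some (-1))).map (fun b => b - 1)
  (starts.zip bounds).map (fun p => PySem.List.slice lines (some p.1) (some p.2))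

-- ===== PRECONDITION & SPEC =====
def Spec_split_bot_reports (lines : List String) (out : List (List String)) : Prop := out = split_bot_reports_alt lines
instance (lines : List String) (out : List (List String)) : Decidable (Spec_split_bot_reports lines out) := by unfold Spec_split_bot_reports; infer_instance

-- ===== CLAIM (what is proved, stated in full; the proofs are below) =====
def Claim_equal_split_bot_reports : Prop := ∀ (lines : List String), Dom_split_bot_reports lines → Spec_split_bot_reports lines (split_bot_reports lines)

-- ===== LEMMAS AND PROOFS =====

-- boundary predicate on a (Nat) line index
def isB (lines : List String) (k : Nat) : Bool :=
  PySem.Str.startswith (lines.getD (k - 1) "") "========================================" &&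
  PySem.Str.startswith (lines.getD k "") "Bot ID:"

-- blocks produced while scanning the remaining indices, current block starting at s
def auxA (lines : List String) : Int → List Nat → List (List String)
  | _, [] => []
  | s, k :: ks =>
    if isB lines k then
      PySem.List.slice lines (some s) (some (k : Int)) :: auxA lines ((k : Int) - 1) ks
    else auxA lines s ks

-- blocks cut at the given boundary list, current block starting at s
def consume (lines : List String) : Int → List Int → List (List String)
  | _, [] => []
  | s, b :: bs => PySem.List.slice lines (some s) (some b) :: consume lines (b - 1) bs

theorem auxA_eq_consume (lines : List String) (ks : List Nat) :
    ∀ s : Int, auxA lines s ks =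
      consume lines s ((ks.filter (isB lines)).map (fun (k : Nat) => (k : Int))) := by
  induction ks with
  | nil => intro s; rfl
  | cons k ks ih =>
    intro s
    by_cases h : isB lines k
    · simp [auxA, consume, h, ih]
    · simp [auxA, h, ih]

theorem zip_starts_eq_consume (lines : List String) (bs : List Int) :
    ∀ s : Int, ((s :: (bs.dropLast.map (fun b => b - 1))).zip bs).map
        (fun p => PySem.List.slice lines (some p.1) (some p.2)) = consume lines s bs := by
  induction bs with
  | nil => intro s; rfl
  | cons b bs ih =>
    intro s
    cases bs with
    | nil => rfl
    | cons c cs =>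
      have := ih (b - 1)
      simp only [List.dropLast_cons₂, List.map_cons, List.zip_cons_cons, consume] at this ⊢
      rw [this]

theorem slice_snoc (lines : List String) (s : Int) (k : Nat) (hs : 0 ≤ s) (hsk : s < (k : Int))
    (hk : k < lines.length) :
    PySem.List.slice lines (some s) (some (k : Int)) ++ [lines[k]] =
      PySem.List.slice lines (some s) (some ((k : Int) + 1)) := by
  have h1 : ((k : Int) + 1) = ((k + 1 : Nat) : Int) := by push_cast; ring
  rw [h1, PySem.List.slice_toNat _ hs (by positivity), PySem.List.slice_toNat _ hs (by positivity)]
  have h2 : ((k : Int)).toNat = k := by omega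
  have h3 : (((k + 1 : Nat) : Int)).toNat = k + 1 := by omega
  rw [h2, h3]
  have hst : s.toNat < k := by omega
  have hlen : k - s.toNat < (lines.drop s.toNat).length := by
    simp [List.length_drop]; omega
  rw [show k + 1 - s.toNat = (k - s.toNat) + 1 by omega, List.take_add_one]
  congr 1
  rw [List.getElem?_drop]
  simp [show s.toNat + (k - s.toNat) = k by omega, hk]

theorem slice_two (lines : List String) (k : Nat) (hk1 : 1 ≤ k) (hk : k < lines.length) :
    PySem.List.slice lines (some ((k : Int) - 1)) (some ((k : Int) + 1)) =
      [lines[k - 1], lines[k]] := by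
  have e1 : ((k : Int) - 1) = ((k - 1 : Nat) : Int) := by omega
  have e2 : ((k : Int) + 1) = ((k + 1 : Nat) : Int) := by push_cast; ring
  rw [e1, e2, PySem.List.slice_natCast]
  rw [show k + 1 - (k - 1) = 2 by omega]
  rw [List.drop_eq_getElem_cons (by omega : k - 1 < lines.length)]
  rw [show k - 1 + 1 = k by omega]
  rw [List.drop_eq_getElem_cons hk]
  rfl

theorem slice_len_pos (lines : List String) (s : Int) (k : Nat) (hs : 0 ≤ s) (hsk : s < (k : Int))
    (hk : k < lines.length) : 0 < (PySem.List.slice lines (some s) (some (k : Int))).length := by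
  rw [PySem.List.slice_toNat _ hs (by positivity)]
  simp only [List.length_take, List.length_drop]
  omega

theorem foldA (lines : List String) :
    ∀ (m k : Nat) (s : Int) (acc : List (List String)),
      k + m = lines.length → 1 ≤ k → 0 ≤ s → s < (k : Int) →
      ((lines.drop k).foldl splitStep
        (acc, PySem.List.slice lines (some s) (some (k : Int)), lines.getD (k - 1) "")).1 =
        acc ++ auxA lines s (List.range' k m) := by
  intro m
  induction m with
  | zero =>
    intro k s acc hkm hk1 hs hsk
    rw [List.drop_eq_nil_of_le (by omega)]
    simp [auxA]
  | succ m ih =>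
    intro k s acc hkm hk1 hs hsk
    have hk : k < lines.length := by omega
    rw [List.drop_eq_getElem_cons hk, List.range'_succ, List.foldl_cons]
    have hgd : lines.getD k "" = lines[k] := List.getD_eq_getElem lines "" hk
    have hpos := slice_len_pos lines s k hs hsk hk
    by_cases hb : isB lines k
    · have hstep : splitStep (acc, PySem.List.slice lines (some s) (some (k : Int)), lines.getD (k - 1) "") lines[k] =
          (acc ++ [PySem.List.slice lines (some s) (some (k : Int))],
           [lines.getD (k - 1) "", lines[k]], lines[k]) := by
        unfold splitStep
        unfold isB at hb
        simp only [hgd] at hb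
        simp only [Bool.and_eq_true] at hb
        rw [if_pos]
        simp only [Bool.and_eq_true, decide_eq_true_eq]
        exact ⟨⟨hb.1, hb.2⟩, hpos⟩
      rw [hstep]
      have e0 : lines.getD (k - 1) "" = lines[k - 1] :=
        List.getD_eq_getElem lines "" (by omega)
      have e1 : [lines.getD (k - 1) "", lines[k]] =
          PySem.List.slice lines (some ((k : Int) - 1)) (some ((k + 1 : Nat) : Int)) := by
        rw [e0, show ((k + 1 : Nat) : Int) = (k : Int) + 1 by push_cast; ring,
          slice_two lines k hk1 hk]
      have e2 : lines[k] = lines.getD (k + 1 - 1) "" := hgd.symm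
      rw [e1, e2, ih (k + 1) ((k : Int) - 1) _ (by omega) (by omega) (by omega) (by push_cast; omega)]
      simp [auxA, hb]
    · have hstep : splitStep (acc, PySem.List.slice lines (some s) (some (k : Int)), lines.getD (k - 1) "") lines[k] =
          (acc, PySem.List.slice lines (some s) (some (k : Int)) ++ [lines[k]], lines[k]) := by
        unfold splitStep
        unfold isB at hb
        simp only [hgd] at hb
        simp only [Bool.and_eq_true] at hb
        rw [if_neg]
        intro hc
        simp only [Bool.and_eq_true, decide_eq_true_eq] at hc
        exact hb ⟨hc.1.1, hc.1.2⟩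
      rw [hstep, slice_snoc lines s k hs hsk hk,
        show (k : Int) + 1 = ((k + 1 : Nat) : Int) by push_cast; ring]
      have e2 : lines[k] = lines.getD (k + 1 - 1) "" := hgd.symm
      rw [e2, ih (k + 1) s _ (by omega) (by omega) hs (by push_cast; omega)]
      simp [auxA, hb]

theorem filter_bridge (lines : List String) (l : List Nat) :
    (l.map (fun (k : Nat) => 1 + (k : Int))).filter (fun i =>
      PySem.Str.startswith (PySem.List.pyGetD lines (i - 1) "") "========================================" &&
      PySem.Str.startswith (PySem.List.pyGetD lines i "") "Bot ID:") =
    ((l.map (fun k => 1 + k)).filter (isB lines)).map (fun (k : Nat) => (k : Int)) := by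
  induction l with
  | nil => rfl
  | cons k l ih =>
    have hpred : (PySem.Str.startswith (PySem.List.pyGetD lines (1 + (k : Int) - 1) "") "========================================" &&
        PySem.Str.startswith (PySem.List.pyGetD lines (1 + (k : Int)) "") "Bot ID:") = isB lines (1 + k) := by
      have e1 : 1 + (k : Int) - 1 = ((k : Nat) : Int) := by omega
      have e2 : 1 + (k : Int) = ((1 + k : Nat) : Int) := by push_cast; ring
      rw [e1, e2, PySem.List.pyGetD_natCast, PySem.List.pyGetD_natCast]
      unfold isB
      rw [show 1 + k - 1 = k by omega]
    rw [List.map_cons, List.map_cons, List.filter_cons, List.filter_cons, hpred]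
    by_cases h : isB lines (1 + k)
    · rw [if_pos h, if_pos h, List.map_cons, ih]
      push_cast
      ring_nf
    · rw [if_neg h, if_neg h, ih]

theorem alt_eq_consume (lines : List String) :
    split_bot_reports_alt lines =
      consume lines 0 (((List.range' 1 (lines.length - 1)).filter (isB lines)).map (fun (k : Nat) => (k : Int))) := by
  simp only [split_bot_reports_alt]
  rw [PySem.List.slice_to_neg_one, zip_starts_eq_consume]
  congr 1
  rw [PySem.List.pyRange_one]
  rw [show ((lines.length : Int) - 1).toNat = lines.length - 1 by omega]
  rw [filter_bridge lines (List.range (lines.length - 1))]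
  rw [List.range'_eq_map_range]

theorem split_bot_reports_spec : Claim_equal_split_bot_reports := by
  intro lines _
  unfold Spec_split_bot_reports
  rw [alt_eq_consume, ← auxA_eq_consume]
  cases lines with
  | nil => rfl
  | cons l rest =>
    unfold split_bot_reports
    rw [List.foldl_cons]
    have hstep0 : splitStep ([], [], "") l = ([], [l], l) := by
      unfold splitStep
      rw [if_neg]
      · rfl
      · intro hc
        simp only [Bool.and_eq_true, decide_eq_true_eq] at hc
        exact absurd hc.1.1 (by decide)
    rw [hstep0]
    have hfold := foldA (l :: rest) rest.length 1 0 [] (by simp [List.length_cons, Nat.add_comm]) (by omega) (by omega) (by omega)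
    have e1 : PySem.List.slice (l :: rest) (some (0 : Int)) (some ((1 : Nat) : Int)) = [l] := by
      rw [PySem.List.slice_toNat _ (by omega) (by omega)]
      rfl
    have e2 : (l :: rest).getD (1 - 1) "" = l := rfl
    rw [e1, e2] at hfold
    exact hfold
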